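-- pv_equiv track=rewrite | github.com/marunemo/ProgrammingSolve | Baekjoon/단계별로 풀어보기/백트래킹/14888.py | embedOperatorMax
-- ===== SOURCE A (Python) =====
-- def embedOperatorMax(numberList, operatorLimit, operatorCount, order, n, result):
--     if order == n:
--         return result
--
--     totalResult = []
--     for i in range(4):
--         if operatorLimit[i] != operatorCount[i]:
--             operatorCount[i] += 1
--             if i == 0:
--                 totalResult.append(embedOperatorMax(numberList, operatorLimit, operatorCount, order + 1, n, result + numberList[order]))
--             elif i == 1:
--                 totalResult.append(embedOperatorMax(numberList, operatorLimit, operatorCount, order + 1, n, result - numberList[order]))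
--             elif i == 2:
--                 totalResult.append(embedOperatorMax(numberList, operatorLimit, operatorCount, order + 1, n, result * numberList[order]))
--             else:
--                 totalResult.append(embedOperatorMax(numberList, operatorLimit, operatorCount, order + 1, n, int(result / numberList[order])))
--             operatorCount[i] -= 1
--     return max(totalResult)
-- ===== SOURCE B (Python) =====
-- # BFS over layers of (accumulator, operator-use counts) states instead of A's DFS
-- # backtracking on a shared mutable count list; return value only (A's temporary
-- # mutation of operatorCount is restored before A returns).
-- def _expand(state, x, lims):
--     acc, (c0, c1, c2, c3) = state
--     out = []
--     if c0 != lims[0]: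
--         out.append((acc + x, (c0 + 1, c1, c2, c3)))
--     if c1 != lims[1]:
--         out.append((acc - x, (c0, c1 + 1, c2, c3)))
--     if c2 != lims[2]:
--         out.append((acc * x, (c0, c1, c2 + 1, c3)))
--     if c3 != lims[3]:
--         out.append((int(acc / x), (c0, c1, c2, c3 + 1)))
--     return out
--
-- def embedOperatorMax(numberList, operatorLimit, operatorCount, order, n, result):
--     if order == n:
--         return result
--     lims = (operatorLimit[0], operatorLimit[1], operatorLimit[2], operatorLimit[3])
--     states = [(result, (operatorCount[0], operatorCount[1], operatorCount[2], operatorCount[3]))]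
--     for pos in range(order, n):
--         x = numberList[pos]
--         states = [s2 for s in states for s2 in _expand(s, x, lims)]
--     return max(acc for acc, _ in states)
-- ===== Notes on version B (the rewrite author's own statement) =====
-- stated objective: alternative
-- what changed: Replaces A's depth-first backtracking recursion on a shared mutable operator-count list by an iterative breadth-first expansion of (accumulator, operator-use-counts) states, one layer per number position, taking the max over the final layer; both sides' int(result/x) is ported exactly as Python's correctly-rounded float division followed by truncation.
import Mathlib
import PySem

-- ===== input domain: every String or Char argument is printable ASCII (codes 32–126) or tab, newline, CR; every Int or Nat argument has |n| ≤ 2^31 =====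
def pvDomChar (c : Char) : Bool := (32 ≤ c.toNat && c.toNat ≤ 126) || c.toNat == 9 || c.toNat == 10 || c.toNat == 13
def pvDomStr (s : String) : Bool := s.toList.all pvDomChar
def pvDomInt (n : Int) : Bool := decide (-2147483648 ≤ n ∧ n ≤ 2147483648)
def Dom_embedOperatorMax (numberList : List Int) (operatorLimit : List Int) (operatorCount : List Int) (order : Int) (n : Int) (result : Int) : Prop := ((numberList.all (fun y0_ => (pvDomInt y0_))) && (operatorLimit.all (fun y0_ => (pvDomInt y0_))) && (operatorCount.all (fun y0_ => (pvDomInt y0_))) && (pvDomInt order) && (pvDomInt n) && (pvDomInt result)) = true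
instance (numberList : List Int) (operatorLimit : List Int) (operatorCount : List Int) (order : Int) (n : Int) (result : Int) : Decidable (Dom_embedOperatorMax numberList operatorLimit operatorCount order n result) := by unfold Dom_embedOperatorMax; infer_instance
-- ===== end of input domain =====

-- B replaces A's DFS backtracking on a shared mutable operator-count list by a layer-by-layer
-- BFS over (accumulator, operator-use-count) states (objective: alternative; return value
-- only — A's temporary mutation of operatorCount is restored before A returns).

-- ===== PORT A =====
-- Both Pythons compute int(result / x): CPython divides two ints to the CORRECTLY ROUNDED
-- IEEE double (round to nearest, ties to even) and int() truncates toward zero.  pvFloatDiv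
-- below is an exact hand port of that (scaling by powers of 2 is lossless, so rounding the
-- 53-bit mantissa of |a|/|b| with ties-to-even reproduces the double exactly); divisor 0 is
-- excluded by Pre_.  It does not model OverflowError of the division: under Dom's 2^31 bound
-- that needs an intermediate ≥ 2^1024, i.e. ≥ 33 chained multiplications and so ≥ 4^33
-- recursive calls of A — no such input is evaluable.
def pvRoundHE (n q : Nat) : Nat :=
  let d := n / q
  let r := n % q
  if 2 * r < q then d else if q < 2 * r then d + 1 else if d % 2 = 0 then d else d + 1

def pvFloatDivMag (p q : Nat) : Nat :=
  let e0 : Int := (Nat.log2 p : Int) - (Nat.log2 q : Int)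
  let E : Int := if q * 2 ^ e0.toNat ≤ p * 2 ^ (-e0).toNat then e0 else e0 - 1
  let sh : Int := 52 - E
  let m := pvRoundHE (p * 2 ^ sh.toNat) (q * 2 ^ (-sh).toNat)
  if 52 ≤ E then m * 2 ^ (E - 52).toNat else m / 2 ^ (52 - E).toNat

def pvFloatDiv (a b : Int) : Int :=
  if a = 0 ∨ b = 0 then 0
  else
    let v : Int := pvFloatDivMag a.natAbs b.natAbs
    if (decide (a < 0)) = (decide (b < 0)) then v else -v

-- Python recursion terminates when order reaches n; ported with fuel (n - order).toNat,
-- exact on Pre_ (order ≤ n).  List reads/writes via pyGetD/pySetD, in range under Pre_;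
-- max([]) (ValueError) via .getD 0, never reached under Pre_.
def pvAgo (numberList operatorLimit : List Int) : Nat → List Int → Int → Int → Int
  | 0, _, _, result => result
  | fuel+1, cnt, order, result =>
    let x := PySem.List.pyGetD numberList order 0
    let t0 : List Int :=
      (if PySem.List.pyGetD operatorLimit 0 0 ≠ PySem.List.pyGetD cnt 0 0 then
        [pvAgo numberList operatorLimit fuel (PySem.List.pySetD cnt 0 (PySem.List.pyGetD cnt 0 0 + 1)) (order+1) (result + x)] else [])
    let t1 := t0 ++
      (if PySem.List.pyGetD operatorLimit 1 0 ≠ PySem.List.pyGetD cnt 1 0 then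
        [pvAgo numberList operatorLimit fuel (PySem.List.pySetD cnt 1 (PySem.List.pyGetD cnt 1 0 + 1)) (order+1) (result - x)] else [])
    let t2 := t1 ++
      (if PySem.List.pyGetD operatorLimit 2 0 ≠ PySem.List.pyGetD cnt 2 0 then
        [pvAgo numberList operatorLimit fuel (PySem.List.pySetD cnt 2 (PySem.List.pyGetD cnt 2 0 + 1)) (order+1) (result * x)] else [])
    let t3 := t2 ++
      (if PySem.List.pyGetD operatorLimit 3 0 ≠ PySem.List.pyGetD cnt 3 0 then
        [pvAgo numberList operatorLimit fuel (PySem.List.pySetD cnt 3 (PySem.List.pyGetD cnt 3 0 + 1)) (order+1) (pvFloatDiv result x)] else [])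
    (PySem.List.max? t3 (fun y => y)).getD 0

def embedOperatorMax (numberList : List Int) (operatorLimit : List Int) (operatorCount : List Int) (order : Int) (n : Int) (result : Int) : Int :=
  if order = n then result
  else pvAgo numberList operatorLimit (n - order).toNat operatorCount order result

-- ===== PORT B =====
def pvExpand (lims : Int × Int × Int × Int) (x : Int) (s : Int × (Int × Int × Int × Int)) :
    List (Int × (Int × Int × Int × Int)) :=
  let (acc, (c0, c1, c2, c3)) := s
  (if c0 ≠ lims.1 then [(acc + x, (c0 + 1, c1, c2, c3))] else []) ++
  (if c1 ≠ lims.2.1 then [(acc - x, (c0, c1 + 1, c2, c3))] else []) ++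
  (if c2 ≠ lims.2.2.1 then [(acc * x, (c0, c1, c2 + 1, c3))] else []) ++
  (if c3 ≠ lims.2.2.2 then [(pvFloatDiv acc x, (c0, c1, c2, c3 + 1))] else [])

def embedOperatorMax_alt (numberList : List Int) (operatorLimit : List Int) (operatorCount : List Int) (order : Int) (n : Int) (result : Int) : Int :=
  if order = n then result
  else
    let lims : Int × Int × Int × Int :=
      (PySem.List.pyGetD operatorLimit 0 0, PySem.List.pyGetD operatorLimit 1 0,
       PySem.List.pyGetD operatorLimit 2 0, PySem.List.pyGetD operatorLimit 3 0)
    let states := (PySem.List.pyRange order n 1).foldl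
      (fun st pos => st.flatMap (pvExpand lims (PySem.List.pyGetD numberList pos 0)))
      [(result, (PySem.List.pyGetD operatorCount 0 0, PySem.List.pyGetD operatorCount 1 0,
                 PySem.List.pyGetD operatorCount 2 0, PySem.List.pyGetD operatorCount 3 0))]
    (PySem.List.max? (states.map (·.1)) (fun y => y)).getD 0

-- ===== PRECONDITION & SPEC =====
-- Pre_ = exactly the inputs on which A returns.  Excluded raises: order > n,
-- n > len(numberList), a list shorter than 4 (IndexError); no operator ever available at some
-- position (max([]) ValueError: neither an 'unlimited' operator with count past its limit nor
-- enough remaining capacity); a zero operand while division stays available (ZeroDivisionError: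
-- whenever division is still placeable at start, under finite limits some branch defers it to
-- any position the availability condition lets it reach, so a zero operand always hits it).
def Pre_embedOperatorMax (numberList : List Int) (operatorLimit : List Int) (operatorCount : List Int) (order : Int) (n : Int) (result : Int) : Prop :=
  order = n ∨
  (0 ≤ order ∧ order < n ∧ n ≤ (numberList.length : Int) ∧
   4 ≤ operatorLimit.length ∧ 4 ≤ operatorCount.length ∧
   ((PySem.List.pyGetD operatorLimit 0 0 < PySem.List.pyGetD operatorCount 0 0 ∨
     PySem.List.pyGetD operatorLimit 1 0 < PySem.List.pyGetD operatorCount 1 0 ∨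
     PySem.List.pyGetD operatorLimit 2 0 < PySem.List.pyGetD operatorCount 2 0 ∨
     PySem.List.pyGetD operatorLimit 3 0 < PySem.List.pyGetD operatorCount 3 0) ∨
    n - order ≤ (PySem.List.pyGetD operatorLimit 0 0 - PySem.List.pyGetD operatorCount 0 0) +
                (PySem.List.pyGetD operatorLimit 1 0 - PySem.List.pyGetD operatorCount 1 0) +
                (PySem.List.pyGetD operatorLimit 2 0 - PySem.List.pyGetD operatorCount 2 0) +
                (PySem.List.pyGetD operatorLimit 3 0 - PySem.List.pyGetD operatorCount 3 0)) ∧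
   (PySem.List.pyGetD operatorLimit 3 0 ≠ PySem.List.pyGetD operatorCount 3 0 →
      ∀ pos ∈ PySem.List.pyRange order n 1, PySem.List.pyGetD numberList pos 0 ≠ 0))
instance (numberList : List Int) (operatorLimit : List Int) (operatorCount : List Int) (order : Int) (n : Int) (result : Int) : Decidable (Pre_embedOperatorMax numberList operatorLimit operatorCount order n result) := by unfold Pre_embedOperatorMax; infer_instance

def pvWitness_embedOperatorMax : List Int × List Int × List Int × Int × Int × Int :=
  ([1, 2, 3], [1, 1, 1, 0], [0, 0, 0, 0], 0, 3, 0)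

def Spec_embedOperatorMax (numberList : List Int) (operatorLimit : List Int) (operatorCount : List Int) (order : Int) (n : Int) (result : Int) (out : Int) : Prop := out = embedOperatorMax_alt numberList operatorLimit operatorCount order n result
instance (numberList : List Int) (operatorLimit : List Int) (operatorCount : List Int) (order : Int) (n : Int) (result : Int) (out : Int) : Decidable (Spec_embedOperatorMax numberList operatorLimit operatorCount order n result out) := by unfold Spec_embedOperatorMax; infer_instance

-- ===== CLAIM (what is proved, stated in full; the proofs are below) =====
def Claim_equal_embedOperatorMax : Prop := ∀ (numberList : List Int) (operatorLimit : List Int) (operatorCount : List Int) (order : Int) (n : Int) (result : Int), Dom_embedOperatorMax numberList operatorLimit operatorCount order n result → Pre_embedOperatorMax numberList operatorLimit operatorCount order n result → Spec_embedOperatorMax numberList operatorLimit operatorCount order n result (embedOperatorMax numberList operatorLimit operatorCount order n result)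

-- ===== LEMMAS AND PROOFS =====

-- A's recursion rephrased on the quadruple of counts (and the fixed quadruple of limits)
def pvAq (numberList : List Int) (lims : Int × Int × Int × Int) :
    Nat → (Int × Int × Int × Int) → Int → Int → Int
  | 0, _, _, result => result
  | fuel+1, (c0, c1, c2, c3), order, result =>
    let x := PySem.List.pyGetD numberList order 0
    let l : List Int :=
      (if c0 ≠ lims.1 then [pvAq numberList lims fuel (c0 + 1, c1, c2, c3) (order+1) (result + x)] else []) ++
      (if c1 ≠ lims.2.1 then [pvAq numberList lims fuel (c0, c1 + 1, c2, c3) (order+1) (result - x)] else []) ++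
      (if c2 ≠ lims.2.2.1 then [pvAq numberList lims fuel (c0, c1, c2 + 1, c3) (order+1) (result * x)] else []) ++
      (if c3 ≠ lims.2.2.2 then [pvAq numberList lims fuel (c0, c1, c2, c3 + 1) (order+1) (pvFloatDiv result x)] else [])
    (PySem.List.max? l (fun y => y)).getD 0

def pvRun (numberList : List Int) (lims : Int × Int × Int × Int) (o n : Int)
    (s : List (Int × (Int × Int × Int × Int))) : List (Int × (Int × Int × Int × Int)) :=
  (PySem.List.pyRange o n 1).foldl
    (fun st pos => st.flatMap (pvExpand lims (PySem.List.pyGetD numberList pos 0))) s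

def pvMV (l : List Int) : Int := (PySem.List.max? l (fun y => y)).getD 0

-- enough availability to fill k more slots: either some counter is past its limit
-- (A's '!=' then never fires again: unlimited), or the remaining capacities sum to ≥ k
def pvGood (lims : Int × Int × Int × Int) (k : Nat) (q : Int × Int × Int × Int) : Prop :=
  (lims.1 < q.1 ∨ lims.2.1 < q.2.1 ∨ lims.2.2.1 < q.2.2.1 ∨ lims.2.2.2 < q.2.2.2) ∨
  (q.1 ≤ lims.1 ∧ q.2.1 ≤ lims.2.1 ∧ q.2.2.1 ≤ lims.2.2.1 ∧ q.2.2.2 ≤ lims.2.2.2 ∧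
   (k : Int) ≤ (lims.1 - q.1) + (lims.2.1 - q.2.1) + (lims.2.2.1 - q.2.2.1) + (lims.2.2.2 - q.2.2.2))

theorem pv_foldl_max_shift : ∀ (l : List Int) (a b : Int),
    l.foldl max (max a b) = max a (l.foldl max b) := by
  intro l
  induction l with
  | nil => intro a b; simp
  | cons c l ih =>
    intro a b
    simp only [List.foldl_cons]
    rw [max_assoc, ih]

theorem pvMV_append {u v : List Int} (hu : u ≠ []) (hv : v ≠ []) :
    pvMV (u ++ v) = max (pvMV u) (pvMV v) := by
  obtain ⟨x, u, rfl⟩ := List.exists_cons_of_ne_nil hu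
  obtain ⟨y, v, rfl⟩ := List.exists_cons_of_ne_nil hv
  simp only [pvMV, List.cons_append, PySem.List.max?_id_cons, Option.getD_some]
  rw [List.foldl_append, List.foldl_cons, pv_foldl_max_shift]

theorem pvRun_append (numberList : List Int) (lims : Int × Int × Int × Int) (o n : Int) :
    ∀ (s t : List (Int × (Int × Int × Int × Int))),
    pvRun numberList lims o n (s ++ t) = pvRun numberList lims o n s ++ pvRun numberList lims o n t := by
  unfold pvRun
  generalize PySem.List.pyRange o n 1 = ps
  induction ps with
  | nil => intro s t; simp
  | cons p ps ih => intro s t; simp only [List.foldl_cons, List.flatMap_append, ih]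

theorem pvExpand_ne_nil {lims : Int × Int × Int × Int} {x : Int} {r : Int}
    {q : Int × Int × Int × Int} (h : pvGood lims 1 q) : pvExpand lims x (r, q) ≠ [] := by
  obtain ⟨l0, l1, l2, l3⟩ := lims
  obtain ⟨c0, c1, c2, c3⟩ := q
  dsimp [pvGood] at h
  simp only [pvExpand]
  split_ifs <;> simp_all

theorem pvExpand_good {lims : Int × Int × Int × Int} {x : Int} {k : Nat} {r : Int}
    {q : Int × Int × Int × Int} (h : pvGood lims (k+1) q) :
    ∀ s' ∈ pvExpand lims x (r, q), pvGood lims k s'.2 := by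
  obtain ⟨l0, l1, l2, l3⟩ := lims
  obtain ⟨c0, c1, c2, c3⟩ := q
  intro s' hs'
  unfold pvGood
  dsimp [pvGood] at h
  simp only [pvExpand, List.mem_append, List.mem_ite_nil_right, List.mem_singleton] at hs'
  obtain ((⟨hc, he⟩ | ⟨hc, he⟩) | ⟨hc, he⟩) | ⟨hc, he⟩ := hs' <;> rw [he] <;>
    dsimp <;> omega

theorem pvRun_ne_nil (numberList : List Int) (lims : Int × Int × Int × Int) : ∀ (o n : Int)
    (s : List (Int × (Int × Int × Int × Int))), s ≠ [] →
    (∀ st ∈ s, pvGood lims (n - o).toNat st.2) → pvRun numberList lims o n s ≠ [] := by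
  intro o n
  by_cases hon : o < n
  · intro s hs hg
    have hrec := pvRun_ne_nil numberList lims (o+1) n
    rw [pvRun, PySem.List.pyRange_one_cons hon]
    simp only [List.foldl_cons]
    have hk : (n - o).toNat = (n - (o+1)).toNat + 1 := by omega
    apply hrec
    · obtain ⟨st, s, rfl⟩ := List.exists_cons_of_ne_nil hs
      have hg0 := hg st (by simp)
      have h1 : pvGood lims 1 st.2 := by
        rcases hg0 with h | h
        · exact Or.inl h
        · refine Or.inr ⟨h.1, h.2.1, h.2.2.1, h.2.2.2.1, ?_⟩
          have h5 := h.2.2.2.2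
          have : (1 : Int) ≤ ((n - o).toNat : Int) := by omega
          omega
      have hne := pvExpand_ne_nil (x := PySem.List.pyGetD numberList o 0) (r := st.1) h1
      intro hflat
      simp only [List.flatMap_cons] at hflat
      rcases List.append_eq_nil_iff.mp hflat with ⟨he, _⟩
      exact hne (by cases st; exact he)
    · intro st' hst'
      simp only [List.mem_flatMap] at hst'
      obtain ⟨st, hst, hmem⟩ := hst'
      have := hg st hst
      rw [hk] at this
      cases st with
      | mk a q => exact pvExpand_good this st' hmem
  · intro s hs hg
    rw [pvRun, PySem.List.pyRange_one_eq_nil (by omega)]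
    simpa using hs
termination_by o n => (n - o).toNat
decreasing_by omega

-- max over a BFS run of a union of start states = max over per-state runs
theorem pvRun_max_pieces (numberList : List Int) (lims : Int × Int × Int × Int) (o n : Int) :
    ∀ (s : List (Int × (Int × Int × Int × Int))), s ≠ [] →
    (∀ st ∈ s, pvGood lims (n - o).toNat st.2) →
    pvMV ((pvRun numberList lims o n s).map (·.1)) =
      pvMV (s.map (fun st => pvMV ((pvRun numberList lims o n [st]).map (·.1)))) := by
  intro s
  induction s with
  | nil => intro h; exact absurd rfl h
  | cons s0 rest ih =>
    intro _ hg
    rcases eq_or_ne rest [] with rfl | hrest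
    · simp [pvMV, PySem.List.max?_id_cons]
    · have h1 : pvRun numberList lims o n (s0 :: rest) =
          pvRun numberList lims o n [s0] ++ pvRun numberList lims o n rest := by
        rw [← pvRun_append]; rfl
      have hu : pvRun numberList lims o n [s0] ≠ [] :=
        pvRun_ne_nil numberList lims o n [s0] (by simp)
          (by intro y hy; simp only [List.mem_singleton] at hy; exact hy ▸ hg s0 (by simp))
      have hv : pvRun numberList lims o n rest ≠ [] :=
        pvRun_ne_nil numberList lims o n rest hrest (fun x hx => hg x (by simp [hx]))
      rw [h1, List.map_append, pvMV_append (by simpa using hu) (by simpa using hv)]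
      rw [ih hrest (fun x hx => hg x (by simp [hx]))]
      have hsplit : (s0 :: rest).map (fun st => pvMV ((pvRun numberList lims o n [st]).map (·.1))) =
          [pvMV ((pvRun numberList lims o n [s0]).map (·.1))] ++
            rest.map (fun st => pvMV ((pvRun numberList lims o n [st]).map (·.1))) := rfl
      rw [hsplit, pvMV_append (by simp) (by simpa using hrest)]
      simp [pvMV, PySem.List.max?_id_cons]

-- A's quadruple recursion computes the BFS max
theorem pvAq_eq_run (numberList : List Int) (lims : Int × Int × Int × Int) (nn : Int) :
    ∀ (k : Nat) (q : Int × Int × Int × Int) (o r : Int), pvGood lims k q → o + (k : Int) = nn →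
    pvAq numberList lims k q o r = pvMV ((pvRun numberList lims o nn [(r, q)]).map (·.1)) := by
  intro k
  induction k with
  | zero =>
    intro q o r _ hon
    rw [pvRun, PySem.List.pyRange_one_eq_nil (by omega)]
    simp [pvAq, pvMV, PySem.List.max?_id_cons]
  | succ k ih =>
    intro q o r hgood hon
    obtain ⟨c0, c1, c2, c3⟩ := q
    have hon' : o < nn := by push_cast at hon; omega
    have hrun : pvRun numberList lims o nn [(r, (c0, c1, c2, c3))] =
        pvRun numberList lims (o+1) nn (pvExpand lims (PySem.List.pyGetD numberList o 0) (r, (c0, c1, c2, c3))) := by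
      rw [pvRun, PySem.List.pyRange_one_cons hon', List.foldl_cons]
      simp [pvRun, List.flatMap_cons]
    rw [hrun]
    have hgoods : ∀ st ∈ pvExpand lims (PySem.List.pyGetD numberList o 0) (r, (c0, c1, c2, c3)),
        pvGood lims (nn - (o+1)).toNat st.2 := by
      intro st hst
      have hk : (nn - (o+1)).toNat = k := by push_cast at hon; omega
      rw [hk]
      exact pvExpand_good hgood st hst
    rw [pvRun_max_pieces numberList lims (o+1) nn _
        (pvExpand_ne_nil (by
          rcases hgood with h | h
          · exact Or.inl h
          · exact Or.inr ⟨h.1, h.2.1, h.2.2.1, h.2.2.2.1, by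
              have := h.2.2.2.2; push_cast at this ⊢; omega⟩))
        hgoods]
    have hIH : ∀ (st : Int × (Int × Int × Int × Int)),
        st ∈ pvExpand lims (PySem.List.pyGetD numberList o 0) (r, (c0, c1, c2, c3)) →
        pvMV ((pvRun numberList lims (o+1) nn [st]).map (·.1)) = pvAq numberList lims k st.2 (o+1) st.1 := by
      intro st hst
      rw [ih st.2 (o+1) st.1 (by
            have hk : (nn - (o+1)).toNat = k := by push_cast at hon; omega
            have := hgoods st hst; rwa [hk] at this)
          (by push_cast at hon ⊢; omega)]
    rw [List.map_congr_left hIH]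
    simp only [pvAq, pvExpand, pvMV]
    split_ifs <;> simp_all

-- bridge: A's port on the literal count list equals the quadruple recursion
theorem pvAgo_eq_pvAq (numberList operatorLimit : List Int) :
    ∀ (k : Nat) (c0 c1 c2 c3 : Int) (rest : List Int) (o r : Int),
    pvAgo numberList operatorLimit k (c0 :: c1 :: c2 :: c3 :: rest) o r =
      pvAq numberList
        (PySem.List.pyGetD operatorLimit 0 0, PySem.List.pyGetD operatorLimit 1 0,
         PySem.List.pyGetD operatorLimit 2 0, PySem.List.pyGetD operatorLimit 3 0)
        k (c0, c1, c2, c3) o r := by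
  intro k
  induction k with
  | zero => intro c0 c1 c2 c3 rest o r; rfl
  | succ k ih =>
    intro c0 c1 c2 c3 rest o r
    simp only [pvAgo, pvAq]
    have g0 : PySem.List.pyGetD (c0 :: c1 :: c2 :: c3 :: rest) 0 0 = c0 := by simp [pysem]
    have g1 : PySem.List.pyGetD (c0 :: c1 :: c2 :: c3 :: rest) 1 0 = c1 := by simp [pysem]
    have g2 : PySem.List.pyGetD (c0 :: c1 :: c2 :: c3 :: rest) 2 0 = c2 := by simp [pysem]
    have g3 : PySem.List.pyGetD (c0 :: c1 :: c2 :: c3 :: rest) 3 0 = c3 := by simp [pysem]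
    have s0 : PySem.List.pySetD (c0 :: c1 :: c2 :: c3 :: rest) 0 (c0 + 1) = (c0+1) :: c1 :: c2 :: c3 :: rest := by simp [pysem]
    have s1 : PySem.List.pySetD (c0 :: c1 :: c2 :: c3 :: rest) 1 (c1 + 1) = c0 :: (c1+1) :: c2 :: c3 :: rest := by simp [pysem, List.set]
    have s2 : PySem.List.pySetD (c0 :: c1 :: c2 :: c3 :: rest) 2 (c2 + 1) = c0 :: c1 :: (c2+1) :: c3 :: rest := by simp [pysem, List.set]
    have s3 : PySem.List.pySetD (c0 :: c1 :: c2 :: c3 :: rest) 3 (c3 + 1) = c0 :: c1 :: c2 :: (c3+1) :: rest := by simp [pysem, List.set]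
    rw [g0, g1, g2, g3, s0, s1, s2, s3]
    rw [ih (c0+1) c1 c2 c3 rest, ih c0 (c1+1) c2 c3 rest, ih c0 c1 (c2+1) c3 rest, ih c0 c1 c2 (c3+1) rest]
    simp only [ne_comm]

-- ===== VERDICT (by name: the statement is the Claim_ definition above) =====
theorem embedOperatorMax_spec : Claim_equal_embedOperatorMax := by
  intro numberList operatorLimit operatorCount order n result _ hpre
  unfold Spec_embedOperatorMax embedOperatorMax embedOperatorMax_alt
  rcases hpre with heq | ⟨h0, hlt, hlen, hliml, hcntl, havail, _⟩
  · simp [heq]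
  · rw [if_neg (by omega), if_neg (by omega)]
    rcases operatorCount with _ | ⟨c0, _ | ⟨c1, _ | ⟨c2, _ | ⟨c3, crest⟩⟩⟩⟩
    · simp at hcntl
    · simp at hcntl
    · simp at hcntl
    · simp at hcntl
    have g0 : PySem.List.pyGetD (c0 :: c1 :: c2 :: c3 :: crest) 0 0 = c0 := by simp [pysem]
    have g1 : PySem.List.pyGetD (c0 :: c1 :: c2 :: c3 :: crest) 1 0 = c1 := by simp [pysem]
    have g2 : PySem.List.pyGetD (c0 :: c1 :: c2 :: c3 :: crest) 2 0 = c2 := by simp [pysem]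
    have g3 : PySem.List.pyGetD (c0 :: c1 :: c2 :: c3 :: crest) 3 0 = c3 := by simp [pysem]
    rw [g0, g1, g2, g3] at havail
    rw [pvAgo_eq_pvAq numberList operatorLimit _ c0 c1 c2 c3 crest order result]
    rw [pvAq_eq_run numberList _ n _ _ order result
        (by
          rcases havail with h | h
          · exact Or.inl (by dsimp; omega)
          · by_cases hq0 : PySem.List.pyGetD operatorLimit 0 0 < c0
            · exact Or.inl (by dsimp; omega)
            by_cases hq1 : PySem.List.pyGetD operatorLimit 1 0 < c1
            · exact Or.inl (by dsimp; omega)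
            by_cases hq2 : PySem.List.pyGetD operatorLimit 2 0 < c2
            · exact Or.inl (by dsimp; omega)
            by_cases hq3 : PySem.List.pyGetD operatorLimit 3 0 < c3
            · exact Or.inl (by dsimp; omega)
            exact Or.inr ⟨by dsimp; omega, by dsimp; omega, by dsimp; omega, by dsimp; omega,
              by dsimp; omega⟩)
        (by omega)]
    simp only [g0, g1, g2, g3]
    rfl
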